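-- pv_equiv track=rewrite | github.com/ehdud6728-bit/Stock-Hunter | scanner/pattern_breakout_retest_guard_complete.py | _first_existing
-- ===== SOURCE A (Python) =====
-- from typing import Any, Dict, Iterable, List, Optional, Tuple
--
-- def _first_existing(cols: Iterable[str], candidates: Iterable[str]) -> Optional[str]:
--     colset = {str(c).strip(): c for c in cols}
--     lower_map = {str(c).strip().lower(): c for c in cols}
--     for cand in candidates:
--         if cand in colset:
--             return str(colset[cand])
--         low = cand.lower()
--         if low in lower_map:
--             return str(lower_map[low])
--     return None
-- ===== SOURCE B (Python) =====
-- from typing import Iterable, Optional, Tuple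
--
-- def _rank(name: str, cands) -> Optional[Tuple[int, int]]:
--     """Rank of a column name against the candidate list: (index of the first
--     candidate it matches, 0 for an exact match / 1 for a case-insensitive one),
--     or None if it matches no candidate. Lower ranks are better."""
--     low = name.lower()
--     for i, cand in enumerate(cands):
--         if name == cand:
--             return (i, 0)
--         if low == cand.lower():
--             return (i, 1)
--     return None
--
-- def _first_existing(cols: Iterable[str], candidates: Iterable[str]) -> Optional[str]:
--     # Single pass over the columns: pick the column of minimal rank,
--     # later columns taking precedence over earlier ones of equal rank.
--     cands = list(candidates)
--     best = None  # (rank, column)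
--     for c in cols:
--         r = _rank(str(c).strip(), cands)
--         if r is not None and (best is None or r <= best[0]):
--             best = (r, c)
--     return str(best[1]) if best is not None else None
-- ===== Notes on version B (the rewrite author's own statement) =====
-- stated objective: alternative
-- what changed: Inverts the loop structure: instead of walking the candidates and probing two precomputed dicts, B makes a single pass over the columns and keeps the column whose (first-matching-candidate index, exact/case-insensitive phase) rank is minimal, later columns taking precedence on equal rank.
import Mathlib
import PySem

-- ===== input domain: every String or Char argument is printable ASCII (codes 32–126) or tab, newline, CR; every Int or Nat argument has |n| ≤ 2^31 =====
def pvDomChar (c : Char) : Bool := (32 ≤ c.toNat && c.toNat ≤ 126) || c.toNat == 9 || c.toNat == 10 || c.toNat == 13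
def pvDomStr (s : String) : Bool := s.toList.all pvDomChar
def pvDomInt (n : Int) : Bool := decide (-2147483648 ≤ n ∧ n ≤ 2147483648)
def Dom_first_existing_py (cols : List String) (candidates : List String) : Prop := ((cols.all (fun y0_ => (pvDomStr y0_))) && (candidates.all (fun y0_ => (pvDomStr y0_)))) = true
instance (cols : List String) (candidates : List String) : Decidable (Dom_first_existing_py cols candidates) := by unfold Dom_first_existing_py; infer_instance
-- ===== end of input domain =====

-- B inverts the loop structure: one pass over the columns keeping the column of
-- minimal (candidate-index, match-phase) rank, instead of candidate-loop + two dicts.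

-- ===== PORT A =====
-- the 'for cand in candidates' loop with early return, probing the two dicts
def firstExistingLoopA (colset lowerMap : PySem.Dict String String) (candidates : List String) : Option String :=
  match candidates with
  | [] => none
  | cand :: rest =>
    match colset.get? cand with
    | some v => some v
    | none =>
      match lowerMap.get? (PySem.Str.lower cand) with
      | some v => some v
      | none => firstExistingLoopA colset lowerMap rest

def first_existing_py (cols : List String) (candidates : List String) : Option String :=
  -- colset = {str(c).strip(): c for c in cols}; lower_map = {str(c).strip().lower(): c for c in cols}
  let colset := cols.foldl (fun d c => d.insert (PySem.Str.strip c) c) PySem.Dict.empty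
  let lowerMap := cols.foldl (fun d c => d.insert (PySem.Str.lower (PySem.Str.strip c)) c) PySem.Dict.empty
  firstExistingLoopA colset lowerMap candidates

-- ===== PORT B =====
-- _rank: 'for i, cand in enumerate(cands)' with early return; i is the running index
def rankLoop (name low : String) (cands : List String) (i : Nat) : Option (Nat × Nat) :=
  match cands with
  | [] => none
  | cand :: rest =>
    if name = cand then some (i, 0)
    else if low = PySem.Str.lower cand then some (i, 1)
    else rankLoop name low rest (i + 1)

def rankB (name : String) (cands : List String) : Option (Nat × Nat) :=
  rankLoop name (PySem.Str.lower name) cands 0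

-- Python tuple '<=' on (Nat, Nat)
def pairLe (r s : Nat × Nat) : Bool := r.1 < s.1 || (r.1 = s.1 && r.2 ≤ s.2)

-- body of 'for c in cols'
def bStep (cands : List String) (best : Option ((Nat × Nat) × String)) (c : String) : Option ((Nat × Nat) × String) :=
  match rankB (PySem.Str.strip c) cands with
  | none => best
  | some r =>
    match best with
    | none => some (r, c)
    | some b => if pairLe r b.1 then some (r, c) else best

def first_existing_py_alt (cols : List String) (candidates : List String) : Option String :=
  match cols.foldl (bStep candidates) none with
  | some b => some b.2
  | none => none

-- ===== PRECONDITION & SPEC =====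
def Spec_first_existing_py (cols : List String) (candidates : List String) (out : Option String) : Prop := out = first_existing_py_alt cols candidates
instance (cols : List String) (candidates : List String) (out : Option String) : Decidable (Spec_first_existing_py cols candidates out) := by unfold Spec_first_existing_py; infer_instance

-- ===== CLAIM (what is proved, stated in full; the proofs are below) =====
def Claim_equal_first_existing_py : Prop := ∀ (cols : List String) (candidates : List String), Dom_first_existing_py cols candidates → Spec_first_existing_py cols candidates (first_existing_py cols candidates)

-- ===== LEMMAS AND PROOFS =====

-- the last-match fold (what A's dict lookup computes, by get?_foldl_insert_key)
def lastMatch (p : String → Prop) [DecidablePred p] (cols : List String) : Option String :=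
  cols.foldl (fun best c => if p c then some c else best) none

-- lookup in a dict built by a keyed insert-loop = last-match fold over the list
theorem get?_foldl_insert_key (f : String → String) (l : List String)
    (d : PySem.Dict String String) (k : String) :
    (l.foldl (fun d c => d.insert (f c) c) d).get? k
      = l.foldl (fun best c => if f c = k then some c else best) (d.get? k) := by
  induction l generalizing d with
  | nil => rfl
  | cons c rest ih =>
    simp only [List.foldl_cons]
    rw [ih]
    congr 1
    rw [PySem.Dict.get?_insert]
    by_cases h : f c = k
    · simp [h]
    · simp [h, Ne.symm h]

theorem get?_foldl_insert_empty (f : String → String) (l : List String) (k : String) :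
    (l.foldl (fun d c => d.insert (f c) c) PySem.Dict.empty).get? k
      = lastMatch (fun c => f c = k) l := by
  rw [get?_foldl_insert_key, PySem.Dict.get?_empty]; rfl

theorem lastMatch_snoc (p : String → Prop) [DecidablePred p] (cols : List String) (c : String) :
    lastMatch p (cols ++ [c]) = if p c then some c else lastMatch p cols := by
  simp only [lastMatch, List.foldl_append, List.foldl_cons, List.foldl_nil]

-- shifting the running index of rankLoop
theorem rankLoop_succ (name low : String) (cands : List String) (i : Nat) :
    rankLoop name low cands (i + 1)
      = (rankLoop name low cands i).map (fun r => (r.1 + 1, r.2)) := by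
  induction cands generalizing i with
  | nil => rfl
  | cons cand rest ih =>
    simp only [rankLoop]
    split_ifs with h1 h2
    · rfl
    · rfl
    · exact ih (i + 1)

-- core: the B fold for (cand :: rest) in terms of the two last-match folds and the B fold for rest
theorem bFold_cons (cand : String) (rest : List String) (cols : List String) :
    cols.foldl (bStep (cand :: rest)) none
      = match lastMatch (fun c => PySem.Str.strip c = cand) cols with
        | some v => some ((0, 0), v)
        | none =>
          match lastMatch (fun c => PySem.Str.lower (PySem.Str.strip c) = PySem.Str.lower cand) cols with
          | some v => some ((0, 1), v)
          | none => (cols.foldl (bStep rest) none).map (fun b => ((b.1.1 + 1, b.1.2), b.2)) := by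
  induction cols using List.reverseRecOn with
  | nil => rfl
  | append_singleton cols c ih =>
    rw [List.foldl_append, List.foldl_cons, List.foldl_nil, ih,
        lastMatch_snoc, lastMatch_snoc, List.foldl_append, List.foldl_cons, List.foldl_nil]
    simp only [bStep, rankB, rankLoop, rankLoop_succ]
    by_cases hE : PySem.Str.strip c = cand
    · -- rank of c is (0,0); it wins against anything
      rw [if_pos hE, if_pos hE]
      cases hA : lastMatch (fun c => PySem.Str.strip c = cand) cols with
      | some v => simp [pairLe]
      | none =>
        cases hB : lastMatch (fun c => PySem.Str.lower (PySem.Str.strip c) = PySem.Str.lower cand) cols with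
        | some v => simp [pairLe]
        | none =>
          cases hR : cols.foldl (bStep rest) none with
          | none => simp
          | some b => simp [pairLe]
    · rw [if_neg hE, if_neg hE]
      by_cases hL : PySem.Str.lower (PySem.Str.strip c) = PySem.Str.lower cand
      · -- rank of c is (0,1)
        rw [if_pos hL, if_pos hL]
        cases hA : lastMatch (fun c => PySem.Str.strip c = cand) cols with
        | some v => simp [pairLe]
        | none =>
          cases hB : lastMatch (fun c => PySem.Str.lower (PySem.Str.strip c) = PySem.Str.lower cand) cols with
          | some v => simp [pairLe]
          | none =>
            cases hR : cols.foldl (bStep rest) none with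
            | none => simp
            | some b => simp [pairLe]
      · -- rank of c is the shifted rank of c against rest
        rw [if_neg hL, if_neg hL]
        cases hA : lastMatch (fun c => PySem.Str.strip c = cand) cols with
        | some v =>
          cases hr : rankLoop (PySem.Str.strip c) (PySem.Str.lower (PySem.Str.strip c)) rest 0 with
          | none => simp
          | some r => simp [pairLe]
        | none =>
          cases hB : lastMatch (fun c => PySem.Str.lower (PySem.Str.strip c) = PySem.Str.lower cand) cols with
          | some v =>
            cases hr : rankLoop (PySem.Str.strip c) (PySem.Str.lower (PySem.Str.strip c)) rest 0 with
            | none => simp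
            | some r => simp [pairLe]
          | none =>
            cases hr : rankLoop (PySem.Str.strip c) (PySem.Str.lower (PySem.Str.strip c)) rest 0 with
            | none =>
              cases hR : cols.foldl (bStep rest) none <;>
                simp [bStep, rankB, hr, hR]
            | some r =>
              cases hR : cols.foldl (bStep rest) none with
              | none => simp [bStep, rankB, hr, hR]
              | some b =>
                simp only [bStep, rankB, hr, hR, Option.map_some]
                by_cases hle : pairLe r b.1 = true
                · have h2 : pairLe (r.1 + 1, r.2) ((b.1.1 + 1, b.1.2), b.2).1 = true := by
                    simp [pairLe] at hle ⊢; omega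
                  rw [if_pos hle, if_pos h2]; rfl
                · have h2 : ¬ pairLe (r.1 + 1, r.2) ((b.1.1 + 1, b.1.2), b.2).1 = true := by
                    simp [pairLe] at hle ⊢; omega
                  rw [if_neg hle, if_neg h2]; rfl

-- the B fold over an empty candidate list stays none
theorem bFold_nil (cols : List String) :
    cols.foldl (bStep ([] : List String)) none = none := by
  induction cols using List.reverseRecOn with
  | nil => rfl
  | append_singleton cols c ih => simp [List.foldl_append, ih, bStep, rankB, rankLoop]

-- ===== VERDICT =====
theorem first_existing_py_spec : Claim_equal_first_existing_py := by
  unfold Claim_equal_first_existing_py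
  intro cols candidates hdom
  clear hdom
  unfold Spec_first_existing_py first_existing_py first_existing_py_alt
  induction candidates with
  | nil => simp [firstExistingLoopA, bFold_nil]
  | cons cand rest ih =>
    rw [bFold_cons]
    simp only [firstExistingLoopA, get?_foldl_insert_empty]
    cases h1 : lastMatch (fun c => PySem.Str.strip c = cand) cols with
    | some v => rfl
    | none =>
      cases h2 : lastMatch (fun c => PySem.Str.lower (PySem.Str.strip c) = PySem.Str.lower cand) cols with
      | some v => rfl
      | none =>
        rw [ih]
        cases cols.foldl (bStep rest) none <;> rfl
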